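-- pv_equiv track=rewrite | github.com/ucbrise/clipper | containers/python/rpc.py | string_to_input_type
-- ===== SOURCE A (Python) =====
-- INPUT_TYPE_BYTES = 0
--
-- INPUT_TYPE_INTS = 1
--
-- INPUT_TYPE_FLOATS = 2
--
-- INPUT_TYPE_DOUBLES = 3
--
-- INPUT_TYPE_STRINGS = 4
--
-- def string_to_input_type(input_str):
--     input_str = input_str.strip().lower()
--     byte_strs = ["b", "bytes", "byte"]
--     int_strs = ["i", "ints", "int", "integer", "integers"]
--     float_strs = ["f", "floats", "float"]
--     double_strs = ["d", "doubles", "double"]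
--     string_strs = ["s", "strings", "string", "strs", "str"]
--
--     if any(input_str == s for s in byte_strs):
--         return INPUT_TYPE_BYTES
--     elif any(input_str == s for s in int_strs):
--         return INPUT_TYPE_INTS
--     elif any(input_str == s for s in float_strs):
--         return INPUT_TYPE_FLOATS
--     elif any(input_str == s for s in double_strs):
--         return INPUT_TYPE_DOUBLES
--     elif any(input_str == s for s in string_strs):
--         return INPUT_TYPE_STRINGS
--     else:
--         return -1
-- ===== SOURCE B (Python) =====
-- # B: normalize, singularize (drop a trailing 's' on words longer than 2 chars),
-- # then look up the 12 singular stems only.  A enumerates all 19 spellings across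
-- # five branch lists; B reduces the plural spellings to their stems first, so the
-- # table holds only singulars.  Exact: stems of length > 1 pluralize to exactly
-- # A's plural spellings, and the 1-letter codes ("bs", "is", ...) are not accepted
-- # by either (len > 2 guard).
-- _STEM_CODES = {
--     "b": 0, "byte": 0,
--     "i": 1, "int": 1, "integer": 1,
--     "f": 2, "float": 2,
--     "d": 3, "double": 3,
--     "s": 4, "string": 4, "str": 4,
-- }
--
-- def string_to_input_type(input_str):
--     t = input_str.strip().lower()
--     if len(t) > 2 and t.endswith("s"):
--         t = t[:-1]
--     return _STEM_CODES.get(t, -1)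
-- ===== Notes on version B (the rewrite author's own statement) =====
-- stated objective: alternative
-- what changed: B singularizes the normalized string first (drops a trailing 's' on words longer than 2 characters) and then looks up only the 12 singular stems, instead of A's five sequential any(...)-scans over all 19 spellings.
import Mathlib
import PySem

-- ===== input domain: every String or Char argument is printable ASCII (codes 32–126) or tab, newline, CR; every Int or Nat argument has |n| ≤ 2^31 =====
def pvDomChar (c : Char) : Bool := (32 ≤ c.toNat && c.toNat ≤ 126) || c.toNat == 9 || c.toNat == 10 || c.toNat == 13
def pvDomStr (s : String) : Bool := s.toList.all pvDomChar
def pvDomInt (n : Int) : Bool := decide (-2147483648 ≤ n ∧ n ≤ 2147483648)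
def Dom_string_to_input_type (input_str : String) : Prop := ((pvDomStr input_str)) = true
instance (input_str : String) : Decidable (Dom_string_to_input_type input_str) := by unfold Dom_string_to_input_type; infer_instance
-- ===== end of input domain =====

-- B singularizes the normalized string (drops a trailing 's' on words longer than 2 chars) and looks up 12 singular stems, instead of A's five list scans over all 19 spellings (alternative decomposition; return value only).


-- ===== PORT A =====
def string_to_input_type (input_str : String) : Int :=
  let input_str := PySem.Str.lower (PySem.Str.strip input_str)
  let byte_strs : List String := ["b", "bytes", "byte"]
  let int_strs : List String := ["i", "ints", "int", "integer", "integers"]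
  let float_strs : List String := ["f", "floats", "float"]
  let double_strs : List String := ["d", "doubles", "double"]
  let string_strs : List String := ["s", "strings", "string", "strs", "str"]
  if byte_strs.any (fun s => input_str == s) then 0
  else if int_strs.any (fun s => input_str == s) then 1
  else if float_strs.any (fun s => input_str == s) then 2
  else if double_strs.any (fun s => input_str == s) then 3
  else if string_strs.any (fun s => input_str == s) then 4
  else -1

-- ===== PORT B =====
def pvStemCodes : PySem.Dict String Int :=
  PySem.Dict.ofList
    [("b", 0), ("byte", 0),
     ("i", 1), ("int", 1), ("integer", 1),
     ("f", 2), ("float", 2),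
     ("d", 3), ("double", 3),
     ("s", 4), ("string", 4), ("str", 4)]

def string_to_input_type_alt (input_str : String) : Int :=
  let t := PySem.Str.lower (PySem.Str.strip input_str)
  let t := if PySem.Str.len t > 2 && PySem.Str.endswith t "s" then PySem.Str.slice t none (some (-1)) else t
  pvStemCodes.getD t (-1)

-- ===== PRECONDITION & SPEC =====
def Spec_string_to_input_type (input_str : String) (out : Int) : Prop := out = string_to_input_type_alt input_str
instance (input_str : String) (out : Int) : Decidable (Spec_string_to_input_type input_str out) := by unfold Spec_string_to_input_type; infer_instance

-- ===== CLAIM (what is proved, stated in full; the proofs are below) =====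
def Claim_equal_string_to_input_type : Prop := ∀ (input_str : String), Dom_string_to_input_type input_str → Spec_string_to_input_type input_str (string_to_input_type input_str)

-- ===== LEMMAS AND PROOFS =====

-- If t ends in 's', t is its own t[:-1] with 's' re-appended.
theorem pv_reconstruct (t w : String)
    (he : PySem.Str.endswith t "s" = true)
    (hw : PySem.Str.slice t none (some (-1)) = w) :
    t.toList = w.toList ++ ['s'] := by
  have hsuf : ("s" : String).toList <:+ t.toList := by
    have := (PySem.Chars.endswith_iff (s := t.toList) (p := ("s" : String).toList)).mp
      (by simpa [PySem.Str.endswith] using he)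
    exact this
  obtain ⟨pre, hpre⟩ := hsuf
  have hdrop : t.toList.dropLast = w.toList := by
    rw [← hw]; exact (PySem.Str.slice_to_neg_one t).symm
  have hpre' : t.toList.dropLast = pre := by
    rw [← hpre]; simp
  rw [← hpre, ← hpre', hdrop]
  rfl

-- pvStemCodes as a literal Dict.mk (the stems are distinct, so ofList keeps them all in order).
theorem pv_codes_mk : pvStemCodes = PySem.Dict.mk
    [("b", 0), ("byte", 0),
     ("i", 1), ("int", 1), ("integer", 1),
     ("f", 2), ("float", 2),
     ("d", 3), ("double", 3),
     ("s", 4), ("string", 4), ("str", 4)] := by decide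

-- The branch chain and B's singularize-then-lookup agree for every normalized string.
theorem pv_branch_eq_stem (t : String) :
    (if (["b", "bytes", "byte"] : List String).any (fun s => t == s) then (0 : Int)
     else if (["i", "ints", "int", "integer", "integers"] : List String).any (fun s => t == s) then 1
     else if (["f", "floats", "float"] : List String).any (fun s => t == s) then 2
     else if (["d", "doubles", "double"] : List String).any (fun s => t == s) then 3
     else if (["s", "strings", "string", "strs", "str"] : List String).any (fun s => t == s) then 4
     else -1)
    = pvStemCodes.getD
        (if PySem.Str.len t > 2 && PySem.Str.endswith t "s" then PySem.Str.slice t none (some (-1)) else t)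
        (-1) := by
  by_cases h1 : t = "b";      · subst h1; decide
  by_cases h2 : t = "bytes";  · subst h2; decide
  by_cases h3 : t = "byte";   · subst h3; decide
  by_cases h4 : t = "i";      · subst h4; decide
  by_cases h5 : t = "ints";   · subst h5; decide
  by_cases h6 : t = "int";    · subst h6; decide
  by_cases h7 : t = "integer"; · subst h7; decide
  by_cases h8 : t = "integers"; · subst h8; decide
  by_cases h9 : t = "f";      · subst h9; decide
  by_cases h10 : t = "floats"; · subst h10; decide
  by_cases h11 : t = "float"; · subst h11; decide
  by_cases h12 : t = "d";     · subst h12; decide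
  by_cases h13 : t = "doubles"; · subst h13; decide
  by_cases h14 : t = "double"; · subst h14; decide
  by_cases h15 : t = "s";     · subst h15; decide
  by_cases h16 : t = "strings"; · subst h16; decide
  by_cases h17 : t = "string"; · subst h17; decide
  by_cases h18 : t = "strs";  · subst h18; decide
  by_cases h19 : t = "str";   · subst h19; decide
  -- t is none of the 19 spellings: both sides are -1.
  rw [if_neg, if_neg, if_neg, if_neg, if_neg]
  · by_cases hc : (PySem.Str.len t > 2 && PySem.Str.endswith t "s") = true
    · rw [if_pos hc]
      obtain ⟨hlen, hend⟩ := Bool.and_eq_true_iff.mp hc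
      have hlen' : t.toList.length > 2 := by
        simp only [gt_iff_lt, decide_eq_true_eq] at hlen
        simp only [PySem.Str.len_eq] at hlen; omega
      have hend' : PySem.Str.endswith t "s" = true := hend
      by_cases w1 : PySem.Str.slice t none (some (-1)) = "b"
      · rw [pv_reconstruct t _ hend' w1] at hlen'; simp at hlen'
      by_cases w2 : PySem.Str.slice t none (some (-1)) = "byte"
      · exact absurd (String.toList_inj.mp ((pv_reconstruct t _ hend' w2).trans (by decide))) h2
      by_cases w3 : PySem.Str.slice t none (some (-1)) = "i"
      · rw [pv_reconstruct t _ hend' w3] at hlen'; simp at hlen'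
      by_cases w4 : PySem.Str.slice t none (some (-1)) = "int"
      · exact absurd (String.toList_inj.mp ((pv_reconstruct t _ hend' w4).trans (by decide))) h5
      by_cases w5 : PySem.Str.slice t none (some (-1)) = "integer"
      · exact absurd (String.toList_inj.mp ((pv_reconstruct t _ hend' w5).trans (by decide))) h8
      by_cases w6 : PySem.Str.slice t none (some (-1)) = "f"
      · rw [pv_reconstruct t _ hend' w6] at hlen'; simp at hlen'
      by_cases w7 : PySem.Str.slice t none (some (-1)) = "float"
      · exact absurd (String.toList_inj.mp ((pv_reconstruct t _ hend' w7).trans (by decide))) h10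
      by_cases w8 : PySem.Str.slice t none (some (-1)) = "d"
      · rw [pv_reconstruct t _ hend' w8] at hlen'; simp at hlen'
      by_cases w9 : PySem.Str.slice t none (some (-1)) = "double"
      · exact absurd (String.toList_inj.mp ((pv_reconstruct t _ hend' w9).trans (by decide))) h13
      by_cases w10 : PySem.Str.slice t none (some (-1)) = "s"
      · rw [pv_reconstruct t _ hend' w10] at hlen'; simp at hlen'
      by_cases w11 : PySem.Str.slice t none (some (-1)) = "string"
      · exact absurd (String.toList_inj.mp ((pv_reconstruct t _ hend' w11).trans (by decide))) h16
      by_cases w12 : PySem.Str.slice t none (some (-1)) = "str"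
      · exact absurd (String.toList_inj.mp ((pv_reconstruct t _ hend' w12).trans (by decide))) h18
      rw [pv_codes_mk]
      simp [PySem.Dict.getD, PySem.Dict.get?, Ne.symm w1, Ne.symm w2, Ne.symm w3, Ne.symm w4, Ne.symm w5, Ne.symm w6, Ne.symm w7, Ne.symm w8, Ne.symm w9, Ne.symm w10, Ne.symm w11, Ne.symm w12]
    · rw [if_neg hc, pv_codes_mk]
      simp [PySem.Dict.getD, PySem.Dict.get?, Ne.symm h1, Ne.symm h3, Ne.symm h4, Ne.symm h6, Ne.symm h7, Ne.symm h9, Ne.symm h11, Ne.symm h12, Ne.symm h14, Ne.symm h15, Ne.symm h17, Ne.symm h19]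
  all_goals simp [h1, h2, h3, h4, h5, h6, h7, h8, h9, h10, h11, h12, h13, h14, h15, h16, h17, h18, h19]

-- ===== VERDICT (by name: the statement is the Claim_ definition above) =====
theorem string_to_input_type_spec : Claim_equal_string_to_input_type := by
  intro input_str _
  unfold Spec_string_to_input_type string_to_input_type string_to_input_type_alt
  exact pv_branch_eq_stem _
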